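-- pv_equiv track=rewrite | github.com/topherCantrell/sim-gridLock | gridlock/possible_pieces.py | sort_largest
-- ===== SOURCE A (Python) =====
-- def sort_largest(state):
--     p_digits = []
--     p_alphas = []
--     for c in state:
--         if c.isdigit():
--             p_digits.append(c)
--         else:
--             p_alphas.append(c)
--     ret = ''.join(sorted(p_digits, reverse=True)) + ''.join(sorted(p_alphas, reverse=True))
--     return ret
-- ===== SOURCE B (Python) =====
-- def sort_largest(state):
--     # counting sort over the 128 ASCII codes: one pass to count, one bounded pass to emit
--     dcnt = [0] * 128
--     ocnt = [0] * 128
--     for c in state: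
--         if '0' <= c <= '9':
--             dcnt[ord(c)] += 1
--         else:
--             ocnt[ord(c)] += 1
--     parts = []
--     for code in range(127, -1, -1):
--         parts.append(chr(code) * dcnt[code])
--     for code in range(127, -1, -1):
--         parts.append(chr(code) * ocnt[code])
--     return ''.join(parts)
-- ===== Notes on version B (the rewrite author's own statement) =====
-- stated objective: alternative
-- what changed: Replaces the two comparison sorts of A with a counting sort: one pass tallies each of the 128 ASCII codes into digit/non-digit count tables, then the output is emitted by walking the codes from 127 down to 0.
import Mathlib
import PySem

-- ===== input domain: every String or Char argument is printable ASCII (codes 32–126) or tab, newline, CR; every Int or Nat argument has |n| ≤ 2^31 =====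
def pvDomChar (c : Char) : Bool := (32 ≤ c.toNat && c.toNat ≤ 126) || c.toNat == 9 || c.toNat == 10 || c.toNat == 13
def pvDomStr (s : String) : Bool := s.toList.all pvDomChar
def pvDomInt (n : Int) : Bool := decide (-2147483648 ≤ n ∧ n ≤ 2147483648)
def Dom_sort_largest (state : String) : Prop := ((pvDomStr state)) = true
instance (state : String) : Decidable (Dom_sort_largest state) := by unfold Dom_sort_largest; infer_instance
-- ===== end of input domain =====

-- B replaces A's two comparison sorts by a counting sort over the 128 ASCII codes (one counting
-- pass, then a bounded emit pass from code 127 down to 0); equivalence is proved on Dom.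


-- ===== PORT A =====
def sort_largest (state : String) : String :=
  let p := state.toList.foldl
    (fun (acc : List Char × List Char) (c : Char) =>
      if PySem.Chars.isdigit c then (acc.1 ++ [c], acc.2) else (acc.1, acc.2 ++ [c]))
    ([], [])
  String.mk (PySem.List.sorted p.1 (fun x => x) true ++ PySem.List.sorted p.2 (fun x => x) true)

-- ===== PORT B =====
def sort_largest_alt (state : String) : String :=
  let counts := state.toList.foldl
    (fun (a : List Nat × List Nat) (c : Char) =>
      if '0' ≤ c ∧ c ≤ '9' then (a.1.set c.toNat (a.1[c.toNat]! + 1), a.2)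
      else (a.1, a.2.set c.toNat (a.2[c.toNat]! + 1)))
    (List.replicate 128 0, List.replicate 128 0)
  let parts : List (List Char) :=
    ((List.range 128).reverse.map (fun k => List.replicate counts.1[k]! (Char.ofNat k))) ++
    ((List.range 128).reverse.map (fun k => List.replicate counts.2[k]! (Char.ofNat k)))
  String.mk parts.flatten

-- ===== PRECONDITION & SPEC =====
def Spec_sort_largest (state : String) (out : String) : Prop := out = sort_largest_alt state
instance (state : String) (out : String) : Decidable (Spec_sort_largest state out) := by unfold Spec_sort_largest; infer_instance

-- ===== CLAIM (what is proved, stated in full; the proofs are below) =====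
def Claim_equal_sort_largest : Prop := ∀ (state : String), Dom_sort_largest state → Spec_sort_largest state (sort_largest state)

-- ===== LEMMAS AND PROOFS =====

-- code of a char, basic facts
theorem pvToNat_inj {a b : Char} (h : a.toNat = b.toNat) : a = b := by
  have := congrArg Char.ofNat h
  rwa [Char.ofNat_toNat, Char.ofNat_toNat] at this

theorem pvToNat_ofNat {k : Nat} (hk : k < 128) : (Char.ofNat k).toNat = k := by
  have hv : Nat.isValidChar k := Or.inl (by omega)
  rw [Char.toNat_ofNat]; simp [hv]

theorem pvLe_iff {a b : Char} : a ≤ b ↔ a.toNat ≤ b.toNat := by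
  rw [Char.le_def, UInt32.le_iff_toNat_le]; rfl

-- A's loop is a partition
theorem pvFoldA (cs : List Char) : ∀ (d o : List Char),
    cs.foldl (fun (acc : List Char × List Char) (c : Char) =>
      if PySem.Chars.isdigit c then (acc.1 ++ [c], acc.2) else (acc.1, acc.2 ++ [c])) (d, o)
    = (d ++ cs.filter PySem.Chars.isdigit, o ++ cs.filter (fun c => !PySem.Chars.isdigit c)) := by
  induction cs with
  | nil => intro d o; simp
  | cons c cs ih =>
    intro d o
    by_cases h : PySem.Chars.isdigit c = true <;>
      simp [List.filter_cons, h, ih]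

-- getElem! after List.set
theorem pvSet_getElem! (l : List Nat) (i k : Nat) (v : Nat) (hi : i < l.length) (hk : k < l.length) :
    (l.set i v)[k]! = if i = k then v else l[k]! := by
  simp only [List.getElem!_eq_getElem?_getD, List.getElem?_set]
  split_ifs with h <;> simp [h, hi, hk]

-- B's counting loop computes countP for every code
theorem pvFoldB (cs : List Char) : ∀ (d o : List Nat), d.length = 128 → o.length = 128 →
    (∀ c ∈ cs, c.toNat < 128) →
    (cs.foldl (fun (a : List Nat × List Nat) (c : Char) =>
        if '0' ≤ c ∧ c ≤ '9' then (a.1.set c.toNat (a.1[c.toNat]! + 1), a.2)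
        else (a.1, a.2.set c.toNat (a.2[c.toNat]! + 1))) (d, o)).1.length = 128 ∧
    (cs.foldl (fun (a : List Nat × List Nat) (c : Char) =>
        if '0' ≤ c ∧ c ≤ '9' then (a.1.set c.toNat (a.1[c.toNat]! + 1), a.2)
        else (a.1, a.2.set c.toNat (a.2[c.toNat]! + 1))) (d, o)).2.length = 128 ∧
    ∀ k, k < 128 →
    (cs.foldl (fun (a : List Nat × List Nat) (c : Char) =>
        if '0' ≤ c ∧ c ≤ '9' then (a.1.set c.toNat (a.1[c.toNat]! + 1), a.2)
        else (a.1, a.2.set c.toNat (a.2[c.toNat]! + 1))) (d, o)).1[k]!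
      = d[k]! + cs.countP (fun c => PySem.Chars.isdigit c && c.toNat == k) ∧
    (cs.foldl (fun (a : List Nat × List Nat) (c : Char) =>
        if '0' ≤ c ∧ c ≤ '9' then (a.1.set c.toNat (a.1[c.toNat]! + 1), a.2)
        else (a.1, a.2.set c.toNat (a.2[c.toNat]! + 1))) (d, o)).2[k]!
      = o[k]! + cs.countP (fun c => !PySem.Chars.isdigit c && c.toNat == k) := by
  induction cs with
  | nil => intro d o hd ho _; simp [hd, ho]
  | cons c cs ih =>
    intro d o hd ho hcs
    have hc : c.toNat < 128 := hcs c (by simp)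
    have hcs' : ∀ x ∈ cs, x.toNat < 128 := fun x hx => hcs x (by simp [hx])
    have hdig : PySem.Chars.isdigit c = true ↔ ('0' ≤ c ∧ c ≤ '9') := by
      simp [PySem.Chars.isdigit]
    by_cases hb : PySem.Chars.isdigit c = true
    · have h : '0' ≤ c ∧ c ≤ '9' := hdig.mp hb
      rw [List.foldl_cons, if_pos h]
      obtain ⟨h1, h2, h3⟩ := ih (d.set c.toNat (d[c.toNat]! + 1)) o
        (by simp [hd]) ho hcs'
      refine ⟨h1, h2, fun k hk => ?_⟩
      obtain ⟨e1, e2⟩ := h3 k hk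
      constructor
      · rw [e1, pvSet_getElem! d c.toNat k _ (by omega) (by omega)]
        rw [List.countP_cons]
        by_cases hek : c.toNat = k <;> simp [hb, hek] <;> omega
      · rw [e2, List.countP_cons]
        simp [hb]
    · have hbf : PySem.Chars.isdigit c = false := by simpa using hb
      have h : ¬('0' ≤ c ∧ c ≤ '9') := fun hh => by simp [hdig.mpr hh] at hbf
      rw [List.foldl_cons, if_neg h]
      obtain ⟨h1, h2, h3⟩ := ih d (o.set c.toNat (o[c.toNat]! + 1))
        hd (by simp [ho]) hcs'
      refine ⟨h1, h2, fun k hk => ?_⟩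
      obtain ⟨e1, e2⟩ := h3 k hk
      constructor
      · rw [e1, List.countP_cons]
        simp [hbf]
      · rw [e2, pvSet_getElem! o c.toNat k _ (by omega) (by omega)]
        rw [List.countP_cons]
        by_cases hek : c.toNat = k <;> simp [hbf, hek] <;> omega

-- count of an element in a flattened map of disjoint blocks
theorem pvCount_flatten_map (l : List Nat) (f : Nat → List Char) (a : Char) :
    ((l.map f).flatten).count a = (l.map (fun k => (f k).count a)).sum := by
  induction l with
  | nil => simp
  | cons x l ih => simp [List.count_append, ih]

theorem pvSum_map_single (g : Nat → Nat) (k0 : Nat) :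
    ∀ (l : List Nat), l.Nodup → (∀ k ∈ l, k ≠ k0 → g k = 0) →
    (l.map g).sum = if k0 ∈ l then g k0 else 0 := by
  intro l
  induction l with
  | nil => simp
  | cons x l ih =>
    intro hnd h0
    have hx : x ∉ l := (List.nodup_cons.mp hnd).1
    by_cases hxk : x = k0
    · subst hxk
      have : ∀ k ∈ l, g k = 0 := fun k hk => h0 k (by simp [hk]) (fun e => hx (e ▸ hk))
      have hs : (l.map g).sum = 0 := List.sum_eq_zero (by simpa using this)
      simp [hs]
    · have : g x = 0 := h0 x (by simp) hxk
      rw [List.map_cons, List.sum_cons, this,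
        ih (List.nodup_cons.mp hnd).2 (fun k hk => h0 k (by simp [hk]))]
      simp [hxk, Ne.symm hxk]

-- the reverse-sorted filtered list IS the counting-sort emission
theorem pvSorted_eq_counting (cs : List Char) (p : Char → Bool)
    (hcs : ∀ c ∈ cs, c.toNat < 128) :
    PySem.List.sorted (cs.filter p) (fun x => x) true =
    ((List.range 128).reverse.map
      (fun k => List.replicate (cs.countP (fun c => p c && c.toNat == k)) (Char.ofNat k))).flatten := by
  set N : Nat → Nat := fun k => cs.countP (fun c => p c && c.toNat == k) with hN
  set key : Char → Int := fun c => -(c.toNat : Int) with hkey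
  have hinj : Function.Injective key := by
    intro a b h
    simp only [hkey, neg_inj, Int.natCast_inj] at h
    exact pvToNat_inj h
  apply PySem.List.eq_of_perm_of_pairwise_le_of_injective key hinj
  · -- Perm: sorted ~ filter ~ flatten
    refine (PySem.List.sorted_perm (cs.filter p) (fun x => x) true).trans ?_
    symm
    rw [List.perm_iff_count]
    intro a
    rw [pvCount_flatten_map]
    have hg : ((List.range 128).reverse.map
        (fun k => (List.replicate (N k) (Char.ofNat k)).count a)).sum
        = if a.toNat ∈ (List.range 128).reverse
            then (List.replicate (N a.toNat) (Char.ofNat a.toNat)).count a else 0 := by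
      apply pvSum_map_single
      · exact List.nodup_reverse.mpr List.nodup_range
      · intro k hk hne
        have hk128 : k < 128 := by
          rw [List.mem_reverse, List.mem_range] at hk; exact hk
        rw [List.count_replicate]
        have : (Char.ofNat k == a) = false := by
          apply beq_eq_false_iff_ne.mpr
          intro e
          exact hne (by rw [← pvToNat_ofNat hk128, e])
        simp [this]
    rw [hg]
    by_cases ha : a.toNat < 128
    · have hmem : a.toNat ∈ (List.range 128).reverse := by
        rw [List.mem_reverse, List.mem_range]; exact ha
      rw [if_pos hmem, List.count_replicate,
        if_pos (by simp [Char.ofNat_toNat])]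
      symm
      rw [List.count_eq_countP, List.countP_filter, hN]
      symm
      apply List.countP_congr
      intro c _
      constructor
      · intro h
        simp only [Bool.and_eq_true, beq_iff_eq] at h ⊢
        exact ⟨by rw [pvToNat_inj h.2], h.1⟩
      · intro h
        simp only [Bool.and_eq_true, beq_iff_eq] at h ⊢
        exact ⟨h.2, by rw [h.1]⟩
    · rw [if_neg (by rw [List.mem_reverse, List.mem_range]; omega)]
      rw [List.count_eq_countP, List.countP_filter]
      symm
      rw [List.countP_eq_zero]
      intro c hc
      simp only [Bool.and_eq_true, beq_iff_eq]
      rintro ⟨rfl, -⟩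
      exact ha (hcs c hc)
  · -- sorted side pairwise
    have h := PySem.List.sorted_pairwise_rev (cs.filter p) (fun x : Char => x)
    apply h.imp
    intro a b hab
    simp only [hkey, neg_le_neg_iff, Nat.cast_le]
    exact pvLe_iff.mp hab
  · -- counting side pairwise
    rw [← List.flatMap_def, List.pairwise_flatMap]
    constructor
    · intro k _
      exact List.pairwise_replicate.mpr (Or.inr le_rfl)
    · apply List.Pairwise.imp_of_mem (l := (List.range 128).reverse)
        (R := fun a b => b < a)
      · intro k1 k2 hk1 hk2 hlt x hx y hy
        have hk1' : k1 < 128 := by rw [List.mem_reverse, List.mem_range] at hk1; exact hk1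
        have hk2' : k2 < 128 := by rw [List.mem_reverse, List.mem_range] at hk2; exact hk2
        have hx' : x = Char.ofNat k1 := (List.mem_replicate.mp hx).2
        have hy' : y = Char.ofNat k2 := (List.mem_replicate.mp hy).2
        subst hx'; subst hy'
        simp only [hkey, neg_le_neg_iff, Nat.cast_le, pvToNat_ofNat hk1', pvToNat_ofNat hk2']
        omega
      · rw [List.pairwise_reverse]
        exact List.pairwise_lt_range

theorem sort_largest_main : ∀ (state : String), Dom_sort_largest state →
    sort_largest state = sort_largest_alt state := by
  intro state h
  have hlt : ∀ c ∈ state.toList, c.toNat < 128 := by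
    simp only [Dom_sort_largest, pvDomStr, List.all_eq_true] at h
    intro c hc
    have := h c hc
    simp only [pvDomChar, Bool.or_eq_true, Bool.and_eq_true, decide_eq_true_eq, beq_iff_eq] at this
    omega
  simp only [sort_largest, sort_largest_alt]
  rw [pvFoldA]
  obtain ⟨-, -, h3⟩ := pvFoldB state.toList (List.replicate 128 0) (List.replicate 128 0)
    (by simp) (by simp) hlt
  have hrep : ∀ k : Nat, k < 128 → (List.replicate 128 (0 : Nat))[k]! = 0 := by
    intro k hk
    rw [List.getElem!_eq_getElem?_getD, List.getElem?_replicate, if_pos hk]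
    rfl
  rw [List.flatten_append]
  simp only [List.nil_append]
  congr 1
  congr 1
  · rw [pvSorted_eq_counting state.toList PySem.Chars.isdigit hlt]
    congr 1
    apply List.map_congr_left
    intro k hk
    have hk' : k < 128 := by rw [List.mem_reverse, List.mem_range] at hk; exact hk
    rw [(h3 k hk').1, hrep k hk']
    simp
  · rw [pvSorted_eq_counting state.toList (fun c => !PySem.Chars.isdigit c) hlt]
    congr 1
    apply List.map_congr_left
    intro k hk
    have hk' : k < 128 := by rw [List.mem_reverse, List.mem_range] at hk; exact hk
    rw [(h3 k hk').2, hrep k hk']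
    simp

-- ===== VERDICT (by name: the statement is the Claim_ definition above) =====
theorem sort_largest_spec : Claim_equal_sort_largest := by
  intro state h; exact sort_largest_main state h
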